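-- pv_equiv track=rewrite | github.com/snagalingam/tilt_backend | services/amazon_textract/check_document.py | table_list
-- ===== SOURCE A (Python) =====
-- def table_list(source):
--     tables = source.split("\n\n")
--     table_list = []
--
--     for line in tables:
--         if line[0:13] == "Table: Table_":
--             continue
--         else:
--             if len(line) > 0:
--                 table_arr = line.split(",\n")
--
--                 for each_row in table_arr:
--                     row_arr = each_row.split('","')
--                     for word in row_arr:
--                         table_list.append(word.replace('"', ""))
--
--     return table_list
-- ===== SOURCE B (Python) =====
-- def table_list(source):
--     out = []
--     for block in source.split("\n\n"):
--         if block[0:13] == "Table: Table_" or not block: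
--             continue
--         # single left-to-right scan: cut on ",\n" or '","', drop stray quotes
--         cur = []
--         i, n = 0, len(block)
--         while i < n:
--             if block.startswith(",\n", i):
--                 out.append("".join(cur)); cur = []; i += 2
--             elif block.startswith('","', i):
--                 out.append("".join(cur)); cur = []; i += 3
--             elif block[i] == '"':
--                 i += 1
--             else:
--                 cur.append(block[i]); i += 1
--         out.append("".join(cur))
--     return out
-- ===== Notes on version B (the rewrite author's own statement) =====
-- stated objective: alternative
-- what changed: The nested row-then-cell splitting (split by ',\n', then each row by '","', then strip quotes from each token) is replaced by a single left-to-right scan of each block that cuts a token at either delimiter and drops quote characters on the fly.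
import Mathlib
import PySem

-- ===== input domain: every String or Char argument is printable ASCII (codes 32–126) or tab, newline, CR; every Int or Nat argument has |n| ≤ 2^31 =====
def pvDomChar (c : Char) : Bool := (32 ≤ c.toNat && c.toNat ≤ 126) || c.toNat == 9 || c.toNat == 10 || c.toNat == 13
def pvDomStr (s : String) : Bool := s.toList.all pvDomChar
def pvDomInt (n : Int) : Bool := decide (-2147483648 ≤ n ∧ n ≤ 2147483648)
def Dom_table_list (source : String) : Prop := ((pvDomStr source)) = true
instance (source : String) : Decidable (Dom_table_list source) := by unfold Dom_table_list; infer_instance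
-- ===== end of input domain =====

-- B replaces A's nested row-then-cell splits by a single left-to-right scan of each block that cuts
-- a token at either delimiter (",\n" or "\",\"") and drops stray quotes on the fly (objective: alternative).

-- ===== PORT A =====
def table_list (source : String) : List String :=
  (PySem.Chars.splitOn source.toList "\n\n".toList).foldl
    (fun acc line =>
      if PySem.Chars.slice line (some 0) (some 13) = "Table: Table_".toList then acc
      else if 0 < line.length then
        (PySem.Chars.splitOn line ",\n".toList).foldl
          (fun acc each_row =>
            (PySem.Chars.splitOn each_row "\",\"".toList).foldl
              (fun acc word => acc ++ [String.ofList (PySem.Chars.replace word "\"".toList [])]) acc) acc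
      else acc) []

-- ===== PORT B =====
-- the scanner of Source B: startswith tests on the remaining characters, a current-token buffer, an output list
def tlScan (l cur : List Char) (out : List String) : List String :=
  match l with
  | [] => out ++ [String.ofList cur]
  | c :: t =>
    if [',', '\n'].isPrefixOf (c :: t) then tlScan (t.drop 1) [] (out ++ [String.ofList cur])
    else if ['"', ',', '"'].isPrefixOf (c :: t) then tlScan (t.drop 2) [] (out ++ [String.ofList cur])
    else if c = '"' then tlScan t cur out
    else tlScan t (cur ++ [c]) out
termination_by l.length
decreasing_by all_goals simp [List.length_drop]

def table_list_alt (source : String) : List String :=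
  (PySem.Chars.splitOn source.toList "\n\n".toList).foldl
    (fun out block =>
      if PySem.Chars.slice block (some 0) (some 13) = "Table: Table_".toList ∨ block.length = 0 then out
      else tlScan block [] out) []

-- ===== PRECONDITION & SPEC =====
def Spec_table_list (source : String) (out : List String) : Prop := out = table_list_alt source
instance (source : String) (out : List String) : Decidable (Spec_table_list source out) := by unfold Spec_table_list; infer_instance

-- ===== CLAIM (what is proved, stated in full; the proofs are below) =====
def Claim_equal_table_list : Prop := ∀ (source : String), Dom_table_list source → Spec_table_list source (table_list source)

-- ===== LEMMAS AND PROOFS =====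

-- proof-side reference versions of split / replace / the scanner
def consAll (cur : List Char) : List (List Char) → List (List Char)
  | [] => [cur]
  | p :: ps => (cur ++ p) :: ps

def mySplit (sep : List Char) (l : List Char) : List (List Char) :=
  match l with
  | [] => [[]]
  | c :: rest =>
    if sep.isPrefixOf (c :: rest) then [] :: mySplit sep (rest.drop (sep.length - 1))
    else consAll [c] (mySplit sep rest)
termination_by l.length
decreasing_by all_goals simp [List.length_drop]

def filt (w : List Char) : List Char := w.filter (fun c => c != '"')

def myScan (l : List Char) : List (List Char) :=
  match l with
  | [] => [[]]
  | c :: t =>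
    if [',', '\n'].isPrefixOf (c :: t) then [] :: myScan (t.drop 1)
    else if ['"', ',', '"'].isPrefixOf (c :: t) then [] :: myScan (t.drop 2)
    else if c = '"' then myScan t
    else consAll [c] (myScan t)
termination_by l.length
decreasing_by all_goals simp [List.length_drop]

def tokA (l : List Char) : List (List Char) :=
  (mySplit [',', '\n'] l).flatMap (fun row => (mySplit ['"', ',', '"'] row).map filt)

theorem consAll_ne_nil (cur : List Char) (M : List (List Char)) : consAll cur M ≠ [] := by
  cases M <;> simp [consAll]

theorem mySplit_pos (sep : List Char) (c : Char) (rest : List Char) (h : sep.isPrefixOf (c :: rest) = true) :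
    mySplit sep (c :: rest) = [] :: mySplit sep (rest.drop (sep.length - 1)) := by
  rw [mySplit]; simp [h]

theorem mySplit_neg (sep : List Char) (c : Char) (rest : List Char) (h : ¬ sep.isPrefixOf (c :: rest) = true) :
    mySplit sep (c :: rest) = consAll [c] (mySplit sep rest) := by
  rw [mySplit]; simp [h]

theorem mySplit_ne_nil (sep l : List Char) : mySplit sep l ≠ [] := by
  cases l with
  | nil => rw [mySplit]; simp
  | cons c rest =>
    rw [mySplit]
    split
    · simp
    · exact consAll_ne_nil _ _

theorem myScan_ne_nil (l : List Char) : myScan l ≠ [] := by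
  induction l using myScan.induct with
  | case1 => rw [myScan]; simp
  | case2 c t h ih => rw [myScan]; simp [h]
  | case3 c t h1 h2 ih => rw [myScan]; simp [h1, h2]
  | case4 t h1 h2 ih => rw [myScan]; simp [h1, h2]; exact ih
  | case5 c t h1 h2 h3 ih => rw [myScan]; simp [h1, h2, h3]; exact consAll_ne_nil _ _

theorem consAll_consAll (cur c : List Char) (M : List (List Char)) :
    consAll cur (consAll c M) = consAll (cur ++ c) M := by
  cases M <;> simp [consAll]

theorem consAll_nil_of_ne (M : List (List Char)) (h : M ≠ []) : consAll [] M = M := by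
  cases M <;> simp [consAll] at *

theorem splitOn_go_spec (sep : List Char) (hsep : sep ≠ []) :
    ∀ (fuel : Nat) (l cur : List Char) (acc : List (List Char)), l.length ≤ fuel →
      PySem.Chars.splitOn.go sep fuel l cur acc = acc.reverse ++ consAll cur.reverse (mySplit sep l) := by
  intro fuel
  induction fuel with
  | zero =>
    intro l cur acc hl
    have hnil : l = [] := by cases l <;> simp_all
    subst hnil
    rw [PySem.Chars.splitOn.go.eq_def, mySplit]
    simp [consAll]
  | succ fuel ih =>
    intro l cur acc hl
    cases l with
    | nil =>
      rw [PySem.Chars.splitOn.go.eq_def, mySplit]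
      simp [consAll]
    | cons c rest =>
      rw [PySem.Chars.splitOn.go.eq_def]
      obtain ⟨s0, ss, rfl⟩ : ∃ s0 ss, sep = s0 :: ss := by
        cases sep with
        | nil => exact absurd rfl hsep
        | cons a b => exact ⟨a, b, rfl⟩
      by_cases h : (s0 :: ss).isPrefixOf (c :: rest) = true
      · simp only [h, if_pos]
        have hdrop : List.drop (s0 :: ss).length (c :: rest) = rest.drop ss.length := by
          simp [List.drop]
        rw [hdrop, ih _ _ _ (by simp at hl ⊢; omega)]
        rw [mySplit_pos _ _ _ h]
        have hlen : (s0 :: ss).length - 1 = ss.length := by simp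
        rw [hlen]
        simp only [List.reverse_nil]
        rw [consAll_nil_of_ne _ (mySplit_ne_nil _ _)]
        simp [consAll]
      · simp only [h, Bool.false_eq_true, if_false]
        rw [ih _ _ _ (by simp at hl ⊢; omega)]
        rw [mySplit_neg _ _ _ h, consAll_consAll]
        simp

theorem splitOn_eq (l sep : List Char) (hsep : sep ≠ []) :
    PySem.Chars.splitOn l sep = mySplit sep l := by
  rw [PySem.Chars.splitOn, splitOn_go_spec sep hsep _ _ _ _ (by omega)]
  simp [consAll_nil_of_ne _ (mySplit_ne_nil sep l)]

theorem replace_go_spec :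
    ∀ (fuel : Nat) (l acc : List Char), l.length ≤ fuel →
      PySem.Chars.replace.go ['"'] [] fuel l acc = acc.reverse ++ filt l := by
  intro fuel
  induction fuel with
  | zero =>
    intro l acc hl
    have hnil : l = [] := by cases l <;> simp_all
    subst hnil
    rw [PySem.Chars.replace.go.eq_def]
    simp [filt]
  | succ fuel ih =>
    intro l acc hl
    cases l with
    | nil => rw [PySem.Chars.replace.go.eq_def]; simp [filt]
    | cons c t =>
      rw [PySem.Chars.replace.go.eq_def]
      by_cases h : '"' = c
      · subst h
        have hpre : List.isPrefixOf ['"'] ('"' :: t) = true := by simp [List.isPrefixOf]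
        simp only [hpre, if_pos]
        rw [show List.drop (['"'].length) ('"' :: t) = t from rfl]
        rw [ih _ _ (by simp at hl ⊢; omega)]
        simp [filt]
      · have hpre : List.isPrefixOf ['"'] (c :: t) = false := by
          simp [List.isPrefixOf, h]
        simp only [hpre, Bool.false_eq_true, if_false]
        rw [ih _ _ (by simp at hl ⊢; omega)]
        have hc : (c != '"') = true := by simp [bne]; exact fun hh => h hh.symm
        simp [filt, hc]

theorem replace_eq (w : List Char) : PySem.Chars.replace w "\"".toList [] = filt w := by
  rw [show ("\"".toList) = ['"'] from by decide]
  rw [PySem.Chars.replace]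
  rw [if_neg (by simp)]
  rw [replace_go_spec _ _ _ (by simp)]
  simp

theorem tlScan_spec (l : List Char) :
    ∀ (cur : List Char) (out : List String),
    tlScan l cur out = out ++ (consAll cur (myScan l)).map String.ofList := by
  induction l using myScan.induct with
  | case1 => intro cur out; rw [tlScan, myScan]; simp [consAll]
  | case2 c t h ih =>
    intro cur out
    rw [tlScan, myScan]
    simp only [h, if_pos]
    rw [ih]
    cases hm : myScan (t.drop 1) with
    | nil => exact absurd hm (myScan_ne_nil _)
    | cons p ps => simp [consAll]
  | case3 c t h1 h2 ih =>
    intro cur out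
    rw [tlScan, myScan]
    simp only [h1, h2, Bool.false_eq_true, if_false, if_pos]
    rw [ih]
    cases hm : myScan (t.drop 2) with
    | nil => exact absurd hm (myScan_ne_nil _)
    | cons p ps => simp [consAll]
  | case4 t h1 h2 ih =>
    intro cur out
    rw [tlScan, myScan]
    simp only [h1, h2, Bool.false_eq_true, if_false, if_true]
    exact ih cur out
  | case5 c t h1 h2 h3 ih =>
    intro cur out
    rw [tlScan, myScan]
    simp only [h1, h2, h3, Bool.false_eq_true, if_false]
    rw [ih, consAll_consAll]

-- the first token of mySplit starts with the first character of the input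
theorem mySplit_head_quote (u : List Char) (r : List Char) (rs : List (List Char))
    (h : mySplit [',', '\n'] u = r :: rs) (hp : List.isPrefixOf ['"'] r = true) :
    ∃ v, u = '"' :: v := by
  cases u with
  | nil =>
    rw [mySplit] at h
    have hr : r = [] := by simpa using (List.cons.injEq _ _ _ _ ▸ h.symm).1
    rw [hr] at hp
    simp [List.isPrefixOf] at hp
  | cons d v =>
    by_cases hd : List.isPrefixOf [',', '\n'] (d :: v) = true
    · rw [mySplit_pos _ _ _ hd] at h
      have hr : r = [] := (List.cons.injEq _ _ _ _ ▸ h.symm).1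
      rw [hr] at hp
      simp [List.isPrefixOf] at hp
    · rw [mySplit_neg _ _ _ hd] at h
      cases hm : mySplit [',', '\n'] v with
      | nil => exact absurd hm (mySplit_ne_nil _ _)
      | cons p ps =>
        rw [hm] at h
        simp only [consAll] at h
        have hr : r = d :: p := (List.cons.injEq _ _ _ _ ▸ h.symm).1
        rw [hr] at hp
        simp [List.isPrefixOf] at hp
        exact ⟨v, by rw [← hp]⟩

theorem mySplit_head_prefix (t r : List Char) (rs : List (List Char))
    (h : mySplit [',', '\n'] t = r :: rs) (hp : List.isPrefixOf [',', '"'] r = true) :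
    List.isPrefixOf [',', '"'] t = true := by
  cases t with
  | nil =>
    rw [mySplit] at h
    have hr : r = [] := by simpa using (List.cons.injEq _ _ _ _ ▸ h.symm).1
    rw [hr] at hp
    simp [List.isPrefixOf] at hp
  | cons c u =>
    by_cases hc : List.isPrefixOf [',', '\n'] (c :: u) = true
    · rw [mySplit_pos _ _ _ hc] at h
      have hr : r = [] := (List.cons.injEq _ _ _ _ ▸ h.symm).1
      rw [hr] at hp
      simp [List.isPrefixOf] at hp
    · rw [mySplit_neg _ _ _ hc] at h
      cases hm : mySplit [',', '\n'] u with
      | nil => exact absurd hm (mySplit_ne_nil _ _)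
      | cons p ps =>
        rw [hm] at h
        simp only [consAll] at h
        have hr : r = c :: p := (List.cons.injEq _ _ _ _ ▸ h.symm).1
        rw [hr] at hp
        simp only [List.isPrefixOf, Bool.and_eq_true, beq_iff_eq] at hp
        obtain ⟨hc2, hp2⟩ := hp
        obtain ⟨v, rfl⟩ := mySplit_head_quote u p ps hm hp2
        cases hc2
        simp [List.isPrefixOf]

theorem tok_eq (l : List Char) : tokA l = myScan l := by
  induction l using myScan.induct with
  | case1 => rw [myScan]; rw [tokA, mySplit]; simp; rw [mySplit]; simp [filt]
  | case2 c t h ih =>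
    rw [myScan]
    simp only [h, if_pos]
    obtain ⟨w, hw⟩ : ∃ w, [',', '\n'] ++ w = c :: t := List.isPrefixOf_iff_prefix.mp h
    simp only [List.cons_append, List.nil_append] at hw
    obtain ⟨rfl, rfl⟩ : c = ',' ∧ t = '\n' :: w := by
      injection hw with hw1 hw2; exact ⟨hw1.symm, hw2.symm⟩
    have hd : List.drop 1 ('\n' :: w) = w := rfl
    rw [hd] at ih ⊢
    rw [tokA, mySplit_pos _ _ _ h]
    rw [show List.drop ([',', '\n'].length - 1) ('\n' :: w) = w from rfl]
    simp only [List.flatMap_cons]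
    rw [show mySplit ['"', ',', '"'] [] = [[]] from by rw [mySplit]]
    rw [← tokA, ih]
    simp [filt]
  | case3 c t h1 h2 ih =>
    rw [myScan]
    simp only [h1, h2, Bool.false_eq_true, if_false, if_pos]
    obtain ⟨w, hw⟩ : ∃ w, ['"', ',', '"'] ++ w = c :: t := List.isPrefixOf_iff_prefix.mp h2
    simp only [List.cons_append, List.nil_append] at hw
    obtain ⟨rfl, rfl⟩ : c = '"' ∧ t = ',' :: '"' :: w := by
      injection hw with hw1 hw2; exact ⟨hw1.symm, hw2.symm⟩
    have hd : List.drop 2 (',' :: '"' :: w) = w := rfl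
    rw [hd] at ih ⊢
    have n1 : ¬ List.isPrefixOf [',', '\n'] ('"' :: ',' :: '"' :: w) = true := by
      simp [List.isPrefixOf]
    have n2 : ¬ List.isPrefixOf [',', '\n'] (',' :: '"' :: w) = true := by
      simp [List.isPrefixOf]
    have n3 : ¬ List.isPrefixOf [',', '\n'] ('"' :: w) = true := by
      simp [List.isPrefixOf]
    rw [tokA, mySplit_neg _ _ _ n1, mySplit_neg _ _ _ n2, mySplit_neg _ _ _ n3,
        consAll_consAll, consAll_consAll]
    cases hm : mySplit [',', '\n'] w with
    | nil => exact absurd hm (mySplit_ne_nil _ _)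
    | cons r0 rs0 =>
      simp only [consAll, List.cons_append, List.nil_append, List.flatMap_cons]
      have hrow : mySplit ['"', ',', '"'] ('"' :: ',' :: '"' :: r0) = [] :: mySplit ['"', ',', '"'] r0 := by
        rw [mySplit_pos _ _ _ (by simp [List.isPrefixOf])]
        rw [show List.drop (['"', ',', '"'].length - 1) (',' :: '"' :: r0) = r0 from rfl]
      rw [hrow]
      simp only [List.map_cons]
      rw [← ih, tokA, hm]
      simp [filt]
  | case4 t h1 h2 ih =>
    rw [myScan]
    simp only [h1, h2, Bool.false_eq_true, if_false, if_true]
    have n1 : ¬ List.isPrefixOf [',', '\n'] ('"' :: t) = true := by simp [List.isPrefixOf]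
    rw [tokA, mySplit_neg _ _ _ n1]
    cases hm : mySplit [',', '\n'] t with
    | nil => exact absurd hm (mySplit_ne_nil _ _)
    | cons r rs =>
      simp only [consAll, List.singleton_append, List.flatMap_cons]
      have hnp : ¬ List.isPrefixOf ['"', ',', '"'] ('"' :: r) = true := by
        intro hcon
        have : List.isPrefixOf [',', '"'] r = true := by
          simpa [List.isPrefixOf] using hcon
        have := mySplit_head_prefix t r rs hm this
        exact h2 (by simpa [List.isPrefixOf] using this)
      rw [mySplit_neg _ _ _ hnp]
      cases hq : mySplit ['"', ',', '"'] r with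
      | nil => exact absurd hq (mySplit_ne_nil _ _)
      | cons q qs =>
        simp only [consAll, List.singleton_append, List.map_cons]
        have hfq : filt ('"' :: q) = filt q := by simp [filt]
        rw [hfq, ← ih, tokA, hm]
        simp [hq]
  | case5 c t h1 h2 h3 ih =>
    rw [myScan]
    simp only [h1, h2, h3, Bool.false_eq_true, if_false]
    rw [tokA, mySplit_neg _ _ _ h1]
    cases hm : mySplit [',', '\n'] t with
    | nil => exact absurd hm (mySplit_ne_nil _ _)
    | cons r rs =>
      simp only [consAll, List.singleton_append, List.flatMap_cons]
      have hnp : ¬ List.isPrefixOf ['"', ',', '"'] (c :: r) = true := by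
        simp only [List.isPrefixOf, Bool.and_eq_true, beq_iff_eq]
        exact fun hh => absurd hh.1.symm h3
      rw [mySplit_neg _ _ _ hnp]
      cases hq : mySplit ['"', ',', '"'] r with
      | nil => exact absurd hq (mySplit_ne_nil _ _)
      | cons q qs =>
        simp only [consAll, List.singleton_append, List.map_cons]
        have hfq : filt (c :: q) = c :: filt q := by
          have hc : (c != '"') = true := by simp [bne]; exact fun hh => h3 hh
          simp [filt, hc]
        rw [hfq, ← ih, tokA, hm]
        simp [hq]

theorem foldl_app {α β : Type} (xs : List α) (f : α → β) (acc : List β) :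
    xs.foldl (fun a x => a ++ [f x]) acc = acc ++ xs.map f := by
  induction xs generalizing acc <;> simp_all

theorem foldl_flat {α β : Type} (xs : List α) (g : α → List β) (acc : List β) :
    xs.foldl (fun a x => a ++ g x) acc = acc ++ xs.flatMap g := by
  induction xs generalizing acc <;> simp_all

theorem innerA_eq (line : List Char) (acc : List String) :
    (PySem.Chars.splitOn line ",\n".toList).foldl
      (fun acc each_row =>
        (PySem.Chars.splitOn each_row "\",\"".toList).foldl
          (fun acc word => acc ++ [String.ofList (PySem.Chars.replace word "\"".toList [])]) acc) acc
    = acc ++ (tokA line).map String.ofList := by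
  have hs2 : ∀ r, PySem.Chars.splitOn r "\",\"".toList = mySplit ['"', ',', '"'] r := by
    intro r
    rw [splitOn_eq _ _ (by simp)]
    rfl
  simp only [hs2, replace_eq, foldl_app]
  simp only [foldl_flat]
  rw [splitOn_eq _ _ (by simp)]
  rw [show (",\n".toList) = [',', '\n'] from rfl]
  rw [tokA]
  simp [List.map_flatMap, List.map_map, Function.comp_def]

theorem outer_eq (tables : List (List Char)) (acc : List String) :
    tables.foldl
      (fun acc line =>
        if PySem.Chars.slice line (some 0) (some 13) = "Table: Table_".toList then acc
        else if 0 < line.length then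
          (PySem.Chars.splitOn line ",\n".toList).foldl
            (fun acc each_row =>
              (PySem.Chars.splitOn each_row "\",\"".toList).foldl
                (fun acc word => acc ++ [String.ofList (PySem.Chars.replace word "\"".toList [])]) acc) acc
        else acc) acc
    = tables.foldl
        (fun out block =>
          if PySem.Chars.slice block (some 0) (some 13) = "Table: Table_".toList ∨ block.length = 0 then out
          else tlScan block [] out) acc := by
  induction tables generalizing acc with
  | nil => rfl
  | cons t ts ih =>
    simp only [List.foldl_cons]
    rw [ih]
    congr 1
    by_cases h1 : PySem.Chars.slice t (some 0) (some 13) = "Table: Table_".toList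
    · rw [if_pos h1, if_pos (Or.inl h1)]
    · by_cases h2 : t.length = 0
      · have hlt : ¬ 0 < t.length := by omega
        rw [if_neg h1, if_neg hlt, if_pos (Or.inr h2)]
      · have h3 : 0 < t.length := Nat.pos_of_ne_zero h2
        have hor : ¬ (PySem.Chars.slice t (some 0) (some 13) = "Table: Table_".toList ∨ t.length = 0) :=
          fun hh => hh.elim (fun h => h1 h) (fun h => h2 h)
        rw [if_neg h1, if_pos h3, if_neg hor]
        rw [innerA_eq, tlScan_spec, consAll_nil_of_ne _ (myScan_ne_nil t), tok_eq]

-- ===== VERDICT (by name: the statement is the Claim_ definition above) =====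
theorem table_list_spec : Claim_equal_table_list := by
  intro source _
  unfold Spec_table_list table_list table_list_alt
  exact outer_eq _ _
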